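-- pv_equiv track=rewrite | github.com/ridpath/pdfscapel | pdfscalpel/solve/password.py | mask_attack
-- ===== SOURCE A (Python) =====
-- import itertools
-- import string
-- from typing import Optional, List, Tuple, Iterator, Callable
--
-- def mask_attack(mask: str) -> Iterator[str]:
--     """Generate passwords from mask pattern
--
--     Mask format:
--         ? = letter (a-zA-Z)
--         # = digit (0-9)
--         @ = symbol
--         * = alphanum (a-zA-Z0-9)
--         literal = fixed character
--     """
--     charsets = []
--     for char in mask:
--         if char == '?':
--             charsets.append(string.ascii_letters)
--         elif char == '#':
--             charsets.append(string.digits)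
--         elif char == '@':
--             charsets.append(string.punctuation)
--         elif char == '*':
--             charsets.append(string.ascii_letters + string.digits)
--         else:
--             charsets.append([char])
--
--     for combo in itertools.product(*charsets):
--         yield ''.join(combo)
-- ===== SOURCE B (Python) =====
-- import string
--
-- def mask_attack(mask):
--     """Generate passwords from mask pattern by back-to-front suffix construction."""
--     table = {'?': string.ascii_letters, '#': string.digits,
--              '@': string.punctuation, '*': string.ascii_letters + string.digits}
--     pools = [table.get(ch, ch) for ch in mask]
--     words = ['']
--     for p in reversed(pools):
--         words = [c + s for c in p for s in words]
--     yield from words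
-- ===== Notes on version B (the rewrite author's own statement) =====
-- stated objective: alternative
-- what changed: Replaces the if/elif charsets list plus itertools.product of growing prefixes with a dict lookup table for the pools and a backwards loop over reversed(pools) that builds the list of suffix words by prepending each pool character.
import Mathlib
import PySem

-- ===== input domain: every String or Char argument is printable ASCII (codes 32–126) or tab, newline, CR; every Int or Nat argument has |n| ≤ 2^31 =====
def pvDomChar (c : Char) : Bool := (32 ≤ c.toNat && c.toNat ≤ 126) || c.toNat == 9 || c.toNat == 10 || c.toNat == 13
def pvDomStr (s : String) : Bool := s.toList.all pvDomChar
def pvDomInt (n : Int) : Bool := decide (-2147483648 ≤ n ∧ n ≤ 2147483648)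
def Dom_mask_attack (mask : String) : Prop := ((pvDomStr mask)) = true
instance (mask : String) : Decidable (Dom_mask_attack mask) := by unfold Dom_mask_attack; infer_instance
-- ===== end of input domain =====

-- B replaces the if/elif charsets list + itertools.product of growing prefixes with a
-- dict lookup table for the pools and a backwards loop over reversed(pools) building
-- the list of suffix words by prepending (alternative decomposition, same cost).
-- Both Pythons are generators; the ports return the list of yielded strings.

-- ===== PORT A =====
-- string.ascii_letters, string.digits, string.punctuation
def pvLettersA : List Char := "abcdefghijklmnopqrstuvwxyzABCDEFGHIJKLMNOPQRSTUVWXYZ".toList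
def pvDigitsA : List Char := "0123456789".toList
def pvPunctA : List Char := "!\"#$%&'()*+,-./:;<=>?@[\\]^_`{|}~".toList

-- the if/elif chain inside A's for loop
def pvCharsetA (c : Char) : List Char :=
  if c = '?' then pvLettersA
  else if c = '#' then pvDigitsA
  else if c = '@' then pvPunctA
  else if c = '*' then pvLettersA ++ pvDigitsA
  else [c]

-- charsets built by the append loop; itertools.product as its standard left fold over
-- the pools (prefixes extended pool by pool, rightmost position varying fastest);
-- ''.join(combo) = String.ofList
def mask_attack (mask : String) : List String :=
  ((mask.toList.foldl (fun acc ch => acc ++ [pvCharsetA ch]) []).foldl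
      (fun acc cs => acc.flatMap (fun combo => cs.map (fun c => combo ++ [c])))
      [[]]).map (fun combo => String.ofList combo)

-- ===== PORT B =====
-- the table dict literal ('?' letters, '#' digits, '@' punctuation, '*' alphanum)
def pvTableB : PySem.Dict Char (List Char) :=
  PySem.Dict.ofList
    [('?', "abcdefghijklmnopqrstuvwxyzABCDEFGHIJKLMNOPQRSTUVWXYZ".toList),
     ('#', "0123456789".toList),
     ('@', "!\"#$%&'()*+,-./:;<=>?@[\\]^_`{|}~".toList),
     ('*', "abcdefghijklmnopqrstuvwxyzABCDEFGHIJKLMNOPQRSTUVWXYZ0123456789".toList)]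

-- pools = [table.get(ch, ch) for ch in mask]
def pvPoolsB (mask : String) : List (List Char) :=
  mask.toList.map (fun ch => pvTableB.getD ch [ch])

-- the loop over reversed(pools) carrying the list of suffix words; Python builds
-- strings '' and c + s — ported as List Char words (prepend = cons), joined by
-- String.ofList at the yield (exact for string concatenation)
def mask_attack_alt (mask : String) : List String :=
  ((pvPoolsB mask).reverse.foldl
      (fun words p => p.flatMap (fun c => words.map (fun s => c :: s)))
      [[]]).map (fun w => String.ofList w)

-- ===== PRECONDITION & SPEC =====
def Spec_mask_attack (mask : String) (out : List String) : Prop := out = mask_attack_alt mask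
instance (mask : String) (out : List String) : Decidable (Spec_mask_attack mask out) := by unfold Spec_mask_attack; infer_instance

-- ===== CLAIM (what is proved, stated in full; the proofs are below) =====
def Claim_equal_mask_attack : Prop := ∀ (mask : String), Dom_mask_attack mask → Spec_mask_attack mask (mask_attack mask)

-- ===== LEMMAS AND PROOFS =====

theorem pvTableB_eq :
    pvTableB = PySem.Dict.mk
      [('?', pvLettersA), ('#', pvDigitsA), ('@', pvPunctA), ('*', pvLettersA ++ pvDigitsA)] := by
  rfl

-- B's table lookup computes A's if/elif chain
theorem pvTable_getD (ch : Char) : pvTableB.getD ch [ch] = pvCharsetA ch := by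
  rw [pvTableB_eq, PySem.Dict.getD_eq_get?_getD, pvCharsetA]
  by_cases h1 : ch = '?'
  · subst h1; rfl
  · by_cases h2 : ch = '#'
    · subst h2; rfl
    · by_cases h3 : ch = '@'
      · subst h3; rfl
      · by_cases h4 : ch = '*'
        · subst h4; rfl
        · have e1 : ('?' == ch) = false := by simp; exact fun e => h1 e.symm
          have e2 : ('#' == ch) = false := by simp; exact fun e => h2 e.symm
          have e3 : ('@' == ch) = false := by simp; exact fun e => h3 e.symm
          have e4 : ('*' == ch) = false := by simp; exact fun e => h4 e.symm
          simp [PySem.Dict.get?_mk_cons, e1, e2, e3, e4, h1, h2, h3, h4]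
          rfl

-- the suffix words B's loop computes, as a recursion (proof-only helper)
def pvBuildB : List (List Char) → List (List Char)
  | [] => [[]]
  | p :: rest => p.flatMap (fun c => (pvBuildB rest).map (fun s => c :: s))

-- B's reversed-foldl loop computes pvBuildB
theorem pv_loop_eq (pools : List (List Char)) :
    pools.reverse.foldl
        (fun words p => p.flatMap (fun c => words.map (fun s => c :: s)))
        [[]]
      = pvBuildB pools := by
  rw [List.foldl_reverse]
  induction pools with
  | nil => rfl
  | cons p rest ih => simp [pvBuildB, ih]

-- A's product fold over the charsets, started from any set of prefixes
theorem pv_fold_eq (pools : List (List Char)) :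
    ∀ (acc : List (List Char)),
      List.foldl (fun acc cs => acc.flatMap (fun combo => cs.map (fun c => combo ++ [c])))
        acc pools
      = acc.flatMap (fun pfx => (pvBuildB pools).map (fun t => pfx ++ t)) := by
  induction pools with
  | nil => intro acc; simp [pvBuildB]
  | cons p rest ih =>
      intro acc
      simp only [List.foldl_cons, ih, pvBuildB]
      rw [List.flatMap_assoc]
      congr 1
      funext pfx
      rw [List.flatMap_map, List.map_flatMap]
      congr 1
      funext c
      simp [List.map_map, Function.comp_def]

-- ===== VERDICT (by name: the statement is the Claim_ definition above) =====
theorem mask_attack_spec : Claim_equal_mask_attack := by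
  intro mask _
  unfold Spec_mask_attack mask_attack mask_attack_alt
  rw [PySem.List.foldl_append_singleton_eq_map, List.nil_append, pv_fold_eq, pv_loop_eq]
  have hp : pvPoolsB mask = mask.toList.map pvCharsetA := by
    simp [pvPoolsB, pvTable_getD]
  rw [hp]
  simp
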